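-- pv_equiv track=rewrite | github.com/davisem/spire | utils/string_utils.py | CreateKMERPairs
-- ===== SOURCE A (Python) =====
-- def CreateKMERPairs ( w, k ):
--     kmerpairs = {}
--     for i in range ( len(w) - k):
--         for j in range (i+1,len(w) - k ):
--             a = w[i:i+k]
--             b = w[j:j+k]
--             d = j - i
--             ab= a+","+b+":"
--             if ab in kmerpairs:
--                 kmerpairs[ab] = min(d,kmerpairs[ab])
--             else :
--                 kmerpairs[ab] = d
--     return kmerpairs
-- ===== SOURCE B (Python) =====
-- # Index-based re-implementation: build a position index per k-mer value once, then
-- # visit each ordered value pair exactly once (at its first co-occurrence) and get its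
-- # minimal gap by a linear two-pointer sweep over the two position lists.
--
-- def _min_gap(pa, pb):
--     # pa, pb ascending position lists with pa[0] < pb[-1]:
--     # minimum of q - p over p in pa, q in pb with p < q (two-pointer sweep)
--     best = pb[-1] - pa[0]
--     i = 0
--     j = 0
--     while i < len(pa) and j < len(pb):
--         if pa[i] < pb[j]:
--             best = min(best, pb[j] - pa[i])
--             i += 1
--         else:
--             j += 1
--     return best
--
--
-- def _first_after(ps, x):
--     # first element of the ascending list ps greater than x (caller guarantees one exists)
--     for q in ps:
--         if q > x:
--             return q
--
--
-- def CreateKMERPairs(w, k):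
--     n = len(w) - k
--     # index: k-mer value -> ascending list of its start positions
--     pos = {}
--     for p in range(n):
--         v = w[p:p+k]
--         if v in pos:
--             pos[v].append(p)
--         else:
--             pos[v] = [p]
--     out = {}
--     for p in range(n):
--         a = w[p:p+k]
--         if pos[a][0] != p:
--             continue  # only the first occurrence of each left value opens a row
--         for q in range(p + 1, n):
--             b = w[q:q+k]
--             if _first_after(pos[b], p) == q:
--                 # (p, q) is the first co-occurrence of the value pair (a, b)
--                 g = _min_gap(pos[a], pos[b])
--                 key = a + "," + b + ":"
--                 if key in out:
--                     out[key] = min(g, out[key])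
--                 else:
--                     out[key] = g
--     return out
-- ===== Notes on version B (the rewrite author's own statement) =====
-- stated objective: alternative
-- what changed: Replaces A's dict-of-running-minima over all O(n^2) index pairs by a k-mer -> sorted-position-list index built in one pass; each ordered pair of k-mer values is then visited once (at its first co-occurrence) and its minimal gap is computed by a linear two-pointer sweep over the two position lists.
import Mathlib
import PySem

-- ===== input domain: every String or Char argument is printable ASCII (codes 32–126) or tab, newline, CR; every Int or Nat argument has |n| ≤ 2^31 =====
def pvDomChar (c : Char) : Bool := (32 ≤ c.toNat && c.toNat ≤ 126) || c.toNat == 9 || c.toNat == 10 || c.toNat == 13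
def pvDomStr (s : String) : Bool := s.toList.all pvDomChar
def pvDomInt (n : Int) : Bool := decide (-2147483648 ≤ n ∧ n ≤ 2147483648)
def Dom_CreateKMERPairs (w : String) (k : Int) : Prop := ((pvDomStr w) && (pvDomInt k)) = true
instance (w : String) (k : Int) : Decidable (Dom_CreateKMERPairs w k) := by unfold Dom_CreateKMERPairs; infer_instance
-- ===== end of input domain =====

-- B replaces A's per-pair dict minimisation by a k-mer position index traversed once per
-- ordered value pair with a two-pointer minimum-gap sweep (alternative algorithm, same result).

-- ===== PORT A =====
def CreateKMERPairs (w : String) (k : Int) : List (String × Int) :=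
  ((PySem.List.pyRange 0 ((PySem.Str.len w : Int) - k) 1).foldl (fun kp i =>
    (PySem.List.pyRange (i + 1) ((PySem.Str.len w : Int) - k) 1).foldl (fun kp j =>
      let a := PySem.Str.slice w (some i) (some (i + k))
      let b := PySem.Str.slice w (some j) (some (j + k))
      let d := j - i
      let ab := a ++ "," ++ b ++ ":"
      match kp.get? ab with
      | some v => kp.insert ab (min d v)
      | none => kp.insert ab d) kp) (PySem.Dict.empty : PySem.Dict String Int)).items

-- ===== PORT B =====
-- Source B's _min_gap while-loop (two-pointer sweep; state: i-, j-suffixes and best)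
def minGapGo : List Int → List Int → Int → Int
  | [], _, best => best
  | _ :: _, [], best => best
  | p :: pa, q :: pb, best =>
    if p < q then minGapGo pa (q :: pb) (min best (q - p))
    else minGapGo (p :: pa) pb best
termination_by pa pb _ => pa.length + pb.length

-- Source B's _min_gap: best initialised to pb[-1] - pa[0]
def minGap (pa pb : List Int) : Int :=
  minGapGo pa pb (PySem.List.pyGetD pb (-1) 0 - PySem.List.pyGetD pa 0 0)

-- Source B's _first_after (Python falls off the loop returning None only when no element
-- qualifies; unreachable under the caller's guarantee — 0 stands for that dead end)
def firstAfter : List Int → Int → Int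
  | [], _ => 0
  | q :: ps, x => if q > x then q else firstAfter ps x

def CreateKMERPairs_alt (w : String) (k : Int) : List (String × Int) :=
  let n : Int := (PySem.Str.len w : Int) - k
  let pos : PySem.Dict String (List Int) :=
    (PySem.List.pyRange 0 n 1).foldl (fun pos p =>
      let v := PySem.Str.slice w (some p) (some (p + k))
      if pos.contains v then pos.insert v (pos.getD v [] ++ [p])
      else pos.insert v [p]) PySem.Dict.empty
  ((PySem.List.pyRange 0 n 1).foldl (fun out p =>
    let a := PySem.Str.slice w (some p) (some (p + k))
    if PySem.List.pyGetD (pos.getD a []) 0 0 ≠ p then out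
    else
      (PySem.List.pyRange (p + 1) n 1).foldl (fun out q =>
        let b := PySem.Str.slice w (some q) (some (q + k))
        if firstAfter (pos.getD b []) p == q then
          let g := minGap (pos.getD a []) (pos.getD b [])
          let key := a ++ "," ++ b ++ ":"
          match out.get? key with
          | some v => out.insert key (min g v)
          | none => out.insert key g
        else out) out) (PySem.Dict.empty : PySem.Dict String Int)).items

-- ===== PRECONDITION & SPEC =====
def Spec_CreateKMERPairs (w : String) (k : Int) (out : List (String × Int)) : Prop := out = CreateKMERPairs_alt w k
instance (w : String) (k : Int) (out : List (String × Int)) : Decidable (Spec_CreateKMERPairs w k out) := by unfold Spec_CreateKMERPairs; infer_instance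

-- ===== CLAIM (what is proved, stated in full; the proofs are below) =====
def Claim_equal_CreateKMERPairs : Prop := ∀ (w : String) (k : Int), Dom_CreateKMERPairs w k → Spec_CreateKMERPairs w k (CreateKMERPairs w k)


-- ===== LEMMAS AND PROOFS =====

-- ---- abbreviations for the shared combinatorial objects ----
def pvKm (w : String) (k : Int) (i : Int) : String := PySem.Str.slice w (some i) (some (i + k))
def pvN (w : String) (k : Int) : Int := (PySem.Str.len w : Int) - k
def pvKey (w : String) (k : Int) (x : Int × Int) : String := pvKm w k x.1 ++ "," ++ pvKm w k x.2 ++ ":"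
def pvVal (x : Int × Int) : Int := x.2 - x.1
def pvPairs (w : String) (k : Int) : List (Int × Int) :=
  (PySem.List.pyRange 0 (pvN w k) 1).flatMap (fun i =>
    (PySem.List.pyRange (i + 1) (pvN w k) 1).map (fun j => (i, j)))
def pvUpd (d : PySem.Dict String Int) (c : String) (g : Int) : PySem.Dict String Int :=
  match d.get? c with
  | some v => d.insert c (min g v)
  | none => d.insert c g
def pvOcc (w : String) (k : Int) (v : String) : List Int :=
  (PySem.List.pyRange 0 (pvN w k) 1).filter (fun p => pvKm w k p == v)
def pvGap (w : String) (k : Int) (x : Int × Int) : Int :=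
  minGap (pvOcc w k (pvKm w k x.1)) (pvOcc w k (pvKm w k x.2))
def pvCond (w : String) (k : Int) (x : Int × Int) : Bool :=
  (PySem.List.pyGetD (pvOcc w k (pvKm w k x.1)) 0 0 == x.1) &&
  (firstAfter (pvOcc w k (pvKm w k x.2)) x.1 == x.2)
def pvLex (x y : Int × Int) : Prop := x.1 < y.1 ∨ (x.1 = y.1 ∧ x.2 < y.2)
def oMin : Option Int → Option Int → Option Int
  | none, m => m
  | o, none => o
  | some a, some b => some (min a b)
def pvCross (pa pb : List Int) : List Int :=
  pa.flatMap (fun p => (pb.filter (fun q => p < q)).map (fun q => q - p))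

-- ---- small list helpers ----
theorem pvHeadD_mem (l : List Int) (d : Int) (h : l ≠ []) : l.headD d ∈ l := by
  cases l; · simp at h
  · simp

theorem pvGetLastD_mem (l : List Int) (d : Int) (h : l ≠ []) : l.getLastD d ∈ l := by
  rw [List.getLastD_eq_getLast?, List.getLast?_eq_getElem?]
  have hl : 0 < l.length := List.length_pos_iff.mpr h
  have : l[l.length - 1]? = some l[l.length - 1] := List.getElem?_eq_getElem (by omega)
  rw [this]
  simp [List.getElem_mem]

theorem pvSorted_headD_le (l : List Int) (d x : Int) (hs : l.Pairwise (· < ·)) (hx : x ∈ l) :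
    l.headD d ≤ x := by
  cases l with
  | nil => simp at hx
  | cons a t =>
    rcases List.mem_cons.mp hx with rfl | h
    · simp
    · simpa using le_of_lt ((List.pairwise_cons.mp hs).1 _ h)

theorem pvSorted_le_getLastD (l : List Int) (d x : Int) (hs : l.Pairwise (· < ·)) (hx : x ∈ l) :
    x ≤ l.getLastD d := by
  induction l with
  | nil => simp at hx
  | cons a t ih =>
    have hs' := List.pairwise_cons.mp hs
    rcases List.mem_cons.mp hx with rfl | h
    · cases ht : t with
      | nil => simp
      | cons b u =>
        subst ht
        have hmem : (b :: u).getLastD d ∈ b :: u := pvGetLastD_mem _ _ (by simp)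
        simpa using le_of_lt (hs'.1 _ hmem)
    · have := ih hs'.2 h
      cases t with
      | nil => simp at h
      | cons b u => simpa using this

theorem pvPyGetD_zero (l : List Int) (h : l ≠ []) : PySem.List.pyGetD l 0 0 = l.headD 0 := by
  cases l with
  | nil => simp at h
  | cons a t => simp [PySem.List.pyGetD, PySem.List.pyGet?, PySem.List.pyIdx?]

theorem pvPyGetD_neg_one (l : List Int) (h : l ≠ []) :
    PySem.List.pyGetD l (-1) 0 = l.getLastD 0 := by
  have hl : 0 < l.length := List.length_pos_iff.mpr h
  simp only [PySem.List.pyGetD, PySem.List.pyGet?, PySem.List.pyIdx?]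
  have h1 : ¬ (0:Int) ≤ -1 := by omega
  have h2 : -(l.length:Int) ≤ -1 := by omega
  simp only [h1, if_false, h2, if_pos]
  rw [show (-(-1:Int)).toNat = 1 by rfl]
  rw [List.getLastD_eq_getLast?, List.getLast?_eq_getElem?]
  simp [Option.bind]

-- ---- min? helpers ----
theorem pvMin?_cons (x : Int) (l : List Int) :
    (x :: l).min? = some (match l.min? with | none => x | some m => min x m) := by
  cases h : l.min? <;> simp [List.min?_cons, h]

theorem pvMin?_append (A B : List Int) : (A ++ B).min? = oMin A.min? B.min? := by
  induction A with
  | nil => cases h : B.min? <;> simp [oMin, h]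
  | cons a A ih =>
    rw [List.cons_append, pvMin?_cons, pvMin?_cons, ih]
    cases hA : A.min? <;> cases hB : B.min? <;> simp [oMin]

theorem pvMin?_dom (X Y : List Int) (h1 : ∀ x ∈ X, ∃ y ∈ Y, y ≤ x)
    (h2 : ∀ y ∈ Y, ∃ x ∈ X, x ≤ y) : X.min? = Y.min? := by
  cases hX : X.min? with
  | none =>
    rw [List.min?_eq_none_iff] at hX
    subst hX
    cases hY : Y.min? with
    | none => rfl
    | some b =>
      obtain ⟨hb, -⟩ := List.min?_eq_some_iff_subtype.mp hY
      obtain ⟨x, hx, -⟩ := h2 _ hb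
      simp at hx
  | some a =>
    obtain ⟨ha, hlba⟩ := List.min?_eq_some_iff_subtype.mp hX
    cases hY : Y.min? with
    | none =>
      rw [List.min?_eq_none_iff] at hY
      subst hY
      obtain ⟨y, hy, -⟩ := h1 _ ha
      simp at hy
    | some b =>
      obtain ⟨hb, hlbb⟩ := List.min?_eq_some_iff_subtype.mp hY
      obtain ⟨y, hy, hya⟩ := h1 _ ha
      obtain ⟨x, hx, hxb⟩ := h2 _ hb
      have := hlba _ hx
      have := hlbb _ hy
      congr 1
      omega

-- ---- PySem.Set.update is blind to non-first duplicates ----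
theorem pvUpdate_filter {β : Type} (K : β → String) (P : β → Bool) :
    ∀ (l : List β) (s : List String),
      (∀ l₁ x l₂, l = l₁ ++ x :: l₂ → P x = false → K x ∈ s ∨ ∃ y ∈ l₁, K y = K x) →
      PySem.Set.update s (l.map K) = PySem.Set.update s ((l.filter P).map K) := by
  intro l
  induction l with
  | nil => intro s _; rfl
  | cons x t ih =>
    intro s H
    cases hP : P x with
    | false =>
      have hmem : K x ∈ s := by
        rcases H [] x t rfl hP with h | ⟨y, hy, -⟩
        · exact h
        · simp at hy
      rw [List.filter_cons_of_neg (by simp [hP]), List.map_cons, PySem.Set.update_cons,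
        PySem.Set.add_of_mem hmem]
      exact ih s (fun l₁ z l₂ hsplit hz => by
        rcases H (x :: l₁) z l₂ (by simp [hsplit]) hz with h | ⟨y, hy, hKy⟩
        · exact Or.inl h
        · rcases List.mem_cons.mp hy with rfl | hy'
          · exact Or.inl (hKy ▸ hmem)
          · exact Or.inr ⟨y, hy', hKy⟩)
    | true =>
      rw [List.filter_cons_of_pos (by simp [hP]), List.map_cons, List.map_cons,
        PySem.Set.update_cons, PySem.Set.update_cons]
      exact ih (PySem.Set.add s (K x)) (fun l₁ z l₂ hsplit hz => by
        rcases H (x :: l₁) z l₂ (by simp [hsplit]) hz with h | ⟨y, hy, hKy⟩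
        · exact Or.inl (by simp [PySem.Set.mem_add, h])
        · rcases List.mem_cons.mp hy with rfl | hy'
          · exact Or.inl (by simp [PySem.Set.mem_add, hKy])
          · exact Or.inr ⟨y, hy', hKy⟩)

-- ---- the min-merging dict loop, characterised ----
theorem pvUpd_insert (d : PySem.Dict String Int) (c : String) (g : Int) :
    pvUpd d c g = d.insert c (match d.get? c with | some v => min g v | none => g) := by
  unfold pvUpd
  cases d.get? c <;> rfl

theorem pvGet?_foldl {α : Type} (key : α → String) (val : α → Int) :
    ∀ (l : List α) (d : PySem.Dict String Int) (c : String),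
      (l.foldl (fun d x => pvUpd d (key x) (val x)) d).get? c =
        oMin (d.get? c) (((l.filter (fun x => key x == c)).map val).min?) := by
  intro l
  induction l with
  | nil => intro d c; cases h : d.get? c <;> simp [oMin, h]
  | cons x t ih =>
    intro d c
    rw [List.foldl_cons, ih]
    by_cases hk : key x = c
    · subst hk
      rw [List.filter_cons_of_pos (by simp), List.map_cons, pvMin?_cons]
      have hupd : (pvUpd d (key x) (val x)).get? (key x) =
          oMin (d.get? (key x)) (some (val x)) := by
        unfold pvUpd
        cases h : d.get? (key x) with
        | none => simp [PySem.Dict.get?_insert_self, oMin]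
        | some v => simp [PySem.Dict.get?_insert_self, oMin, min_comm]
      rw [hupd]
      cases h1 : d.get? (key x) <;> cases h2 : ((t.filter (fun y => key y == key x)).map val).min? <;>
        simp [oMin]
    · rw [List.filter_cons_of_neg (by simp [hk])]
      have hupd : (pvUpd d (key x) (val x)).get? c = d.get? c := by
        unfold pvUpd
        cases d.get? (key x) <;> exact PySem.Dict.get?_insert_of_ne _ _ (fun h => hk h.symm)
      rw [hupd]

theorem pvKeys_foldl {α : Type} (key : α → String) (val : α → Int) (l : List α) :
    (l.foldl (fun d x => pvUpd d (key x) (val x)) PySem.Dict.empty).keys =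
      PySem.Set.ofList (l.map key) := by
  have hb : (fun (d : PySem.Dict String Int) (x : α) => pvUpd d (key x) (val x)) =
      (fun d x => d.insert (key x) (match d.get? (key x) with | some v => min (val x) v | none => val x)) := by
    funext d x
    exact pvUpd_insert d (key x) (val x)
  rw [hb, PySem.Dict.keys_foldl_insert_key, PySem.Dict.keys_empty]
  rw [PySem.Set.ofList_eq_foldl]
  rfl

theorem pvNodup_foldl {α : Type} (key : α → String) (val : α → Int) (l : List α) :
    (l.foldl (fun d x => pvUpd d (key x) (val x)) PySem.Dict.empty).keys.Nodup := by
  have hb : (fun (d : PySem.Dict String Int) (x : α) => pvUpd d (key x) (val x)) =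
      (fun d x => d.insert (key x) (match d.get? (key x) with | some v => min (val x) v | none => val x)) := by
    funext d x
    exact pvUpd_insert d (key x) (val x)
  rw [hb]
  exact PySem.Dict.nodup_keys_foldl_insert_key _ _ _ _ (by simp [PySem.Dict.keys_empty])


-- ---- the two-pointer sweep computes the minimum cross gap ----
theorem pvCross_nil_right (pa : List Int) : pvCross pa [] = [] := by
  unfold pvCross
  induction pa <;> simp_all

theorem minGapGo_spec :
    ∀ (pa pb : List Int) (best : Int), pa.Pairwise (· < ·) → pb.Pairwise (· < ·) →
      minGapGo pa pb best =
        match (pvCross pa pb).min? with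
        | none => best
        | some m => min best m := by
  intro pa pb best hpa hpb
  fun_induction minGapGo pa pb best with
  | case1 pb best => simp [pvCross]
  | case2 p pa best => rw [pvCross_nil_right]; simp
  | case3 p pa q pb best hlt ih =>
    have hpa' := List.pairwise_cons.mp hpa
    have hpb' := List.pairwise_cons.mp hpb
    rw [ih hpa'.2 hpb]
    have hfilter : (q :: pb).filter (fun y => decide (p < y)) = q :: pb := by
      rw [List.filter_eq_self]
      intro y hy
      rcases List.mem_cons.mp hy with rfl | hy'
      · simpa using hlt
      · simpa using lt_trans hlt (hpb'.1 _ hy')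
    have hcross : pvCross (p :: pa) (q :: pb) =
        ((q :: pb).map (fun y => y - p)) ++ pvCross pa (q :: pb) := by
      unfold pvCross
      rw [List.flatMap_cons, hfilter]
    have hblock : ((q :: pb).map (fun y => y - p)).min? = some (q - p) := by
      apply List.min?_eq_some_iff_subtype.mpr
      constructor
      · simp
      · intro x hx
        obtain ⟨y, hy, rfl⟩ := List.mem_map.mp hx
        rcases List.mem_cons.mp hy with rfl | hy'
        · omega
        · have := hpb'.1 _ hy'; omega
    rw [hcross, pvMin?_append, hblock]
    cases h : (pvCross pa (q :: pb)).min? <;> simp [oMin]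
  | case4 p pa q pb best hge ih =>
    have hpa' := List.pairwise_cons.mp hpa
    have hpb' := List.pairwise_cons.mp hpb
    rw [ih hpa hpb'.2]
    have hcross : pvCross (p :: pa) (q :: pb) = pvCross (p :: pa) pb := by
      unfold pvCross
      apply List.flatMap_congr
      intro x hx
      have hxq : ¬ x < q := by
        rcases List.mem_cons.mp hx with rfl | hx'
        · exact hge
        · have := hpa'.1 _ hx'; omega
      rw [List.filter_cons_of_neg (by simpa using hxq)]
    rw [hcross]

theorem pvMinGap_min? (pa pb : List Int) (hpa : pa.Pairwise (· < ·)) (hpb : pb.Pairwise (· < ·))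
    (p0 q0 : Int) (hp0 : p0 ∈ pa) (hq0 : q0 ∈ pb) (hlt : p0 < q0) :
    (pvCross pa pb).min? = some (minGap pa pb) := by
  have hane : pa ≠ [] := by rintro rfl; simp at hp0
  have hbne : pb ≠ [] := by rintro rfl; simp at hq0
  have hmem : q0 - p0 ∈ pvCross pa pb := by
    unfold pvCross
    refine List.mem_flatMap.mpr ⟨p0, hp0, ?_⟩
    exact List.mem_map.mpr ⟨q0, List.mem_filter.mpr ⟨hq0, by simpa using hlt⟩, rfl⟩
  have hne : pvCross pa pb ≠ [] := by rintro h; rw [h] at hmem; simp at hmem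
  obtain ⟨m, hm⟩ := Option.ne_none_iff_exists'.mp (fun h => hne (List.min?_eq_none_iff.mp h))
  obtain ⟨hmmem, hmlb⟩ := List.min?_eq_some_iff_subtype.mp hm
  have hinit_mem : pb.getLastD 0 - pa.headD 0 ∈ pvCross pa pb := by
    unfold pvCross
    refine List.mem_flatMap.mpr ⟨pa.headD 0, pvHeadD_mem _ _ hane, ?_⟩
    refine List.mem_map.mpr ⟨pb.getLastD 0, List.mem_filter.mpr ⟨pvGetLastD_mem _ _ hbne, ?_⟩, rfl⟩
    have h1 : pa.headD 0 ≤ p0 := pvSorted_headD_le _ _ _ hpa hp0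
    have h2 : q0 ≤ pb.getLastD 0 := pvSorted_le_getLastD _ _ _ hpb hq0
    simp only [decide_eq_true_eq]
    omega
  rw [hm]
  unfold minGap
  rw [pvPyGetD_neg_one _ hbne, pvPyGetD_zero _ hane, minGapGo_spec _ _ _ hpa hpb, hm]
  have := hmlb _ hinit_mem
  congr 1
  show m = min (pb.getLastD 0 - pa.headD 0) m
  omega

-- ---- first element after a bound, on a strictly sorted list ----
theorem pvFirstAfter_spec (l : List Int) (x q0 : Int) (hs : l.Pairwise (· < ·)) (hq : q0 ∈ l)
    (hx : x < q0) :
    firstAfter l x ∈ l ∧ x < firstAfter l x ∧ ∀ y ∈ l, x < y → firstAfter l x ≤ y := by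
  induction l with
  | nil => simp at hq
  | cons a t ih =>
    have hs' := List.pairwise_cons.mp hs
    by_cases ha : a > x
    · rw [show firstAfter (a :: t) x = a by simp [firstAfter, ha]]
      refine ⟨by simp, ha, ?_⟩
      intro y hy hxy
      rcases List.mem_cons.mp hy with rfl | hy'
      · omega
      · exact le_of_lt (hs'.1 _ hy')
    · rw [show firstAfter (a :: t) x = firstAfter t x by simp [firstAfter, ha]]
      have hq0t : q0 ∈ t := by
        rcases List.mem_cons.mp hq with rfl | h
        · omega
        · exact h
      obtain ⟨h1, h2, h3⟩ := ih hs'.2 hq0t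
      refine ⟨List.mem_cons_of_mem _ h1, h2, ?_⟩
      intro y hy hxy
      rcases List.mem_cons.mp hy with rfl | hy'
      · omega
      · exact h3 _ hy' hxy

-- ---- the pair stream of A ----
theorem pvMem_pairs (w : String) (k : Int) (x : Int × Int) :
    x ∈ pvPairs w k ↔ 0 ≤ x.1 ∧ x.1 < x.2 ∧ x.2 < pvN w k := by
  obtain ⟨p, q⟩ := x
  simp only [pvPairs, List.mem_flatMap, List.mem_map, PySem.List.mem_pyRange_one, Prod.mk.injEq]
  constructor
  · rintro ⟨i, ⟨h1, h2⟩, j, ⟨h3, h4⟩, rfl, rfl⟩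
    exact ⟨h1, by omega, h4⟩
  · rintro ⟨h1, h2, h3⟩
    exact ⟨p, ⟨h1, by omega⟩, q, ⟨by omega, h3⟩, rfl, rfl⟩

theorem pvPairwise_aux (w : String) (k : Int) :
    ∀ (m : Nat) (a : Int), (pvN w k - a).toNat = m →
      ((PySem.List.pyRange a (pvN w k) 1).flatMap (fun i =>
        (PySem.List.pyRange (i + 1) (pvN w k) 1).map (fun j => (i, j)))).Pairwise pvLex := by
  intro m
  induction m with
  | zero =>
    intro a ha
    rw [PySem.List.pyRange_one_eq_nil (by omega)]
    simp
  | succ m ih =>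
    intro a ha
    rw [PySem.List.pyRange_one_cons (by omega), List.flatMap_cons]
    apply List.pairwise_append.mpr
    refine ⟨?_, ih (a + 1) (by omega), ?_⟩
    · rw [List.pairwise_map]
      exact (PySem.List.pairwise_lt_pyRange_one _ _).imp (fun h => Or.inr ⟨rfl, h⟩)
    · intro x hx y hy
      obtain ⟨j, -, rfl⟩ := List.mem_map.mp hx
      obtain ⟨i, hi, j', -, rfl⟩ := by
        simpa only [List.mem_flatMap, List.mem_map] using hy
      have : a + 1 ≤ i := (PySem.List.mem_pyRange_one.mp hi).1
      exact Or.inl (by simpa using by omega)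

theorem pvPairwise_pairs (w : String) (k : Int) : (pvPairs w k).Pairwise pvLex :=
  pvPairwise_aux w k _ 0 rfl

theorem pvMem_prefix {l l₁ l₂ : List (Int × Int)} {x y : Int × Int}
    (hpw : l.Pairwise pvLex) (hsplit : l = l₁ ++ x :: l₂) (hy : y ∈ l) (hlt : pvLex y x) :
    y ∈ l₁ := by
  subst hsplit
  rcases List.mem_append.mp hy with h | h
  · exact h
  · exfalso
    rcases List.mem_cons.mp h with rfl | h'
    · unfold pvLex at hlt; omega
    · have := (List.pairwise_cons.mp (List.pairwise_append.mp hpw).2.1).1 _ h'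
      unfold pvLex at hlt this
      omega

-- ---- the k-mer occurrence lists ----
theorem pvMem_occ (w : String) (k : Int) (v : String) (p : Int) :
    p ∈ pvOcc w k v ↔ (0 ≤ p ∧ p < pvN w k ∧ pvKm w k p = v) := by
  simp only [pvOcc, List.mem_filter, PySem.List.mem_pyRange_one, beq_iff_eq]
  tauto

theorem pvPairwise_occ (w : String) (k : Int) (v : String) : (pvOcc w k v).Pairwise (· < ·) :=
  List.Pairwise.filter _ (PySem.List.pairwise_lt_pyRange_one _ _)

-- ---- the position index of B, characterised ----
theorem pvPos_getD (km : Int → String) :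
    ∀ (l : List Int) (d : PySem.Dict String (List Int)) (v : String),
      (l.foldl (fun pos p =>
        if pos.contains (km p) then pos.insert (km p) (pos.getD (km p) [] ++ [p])
        else pos.insert (km p) [p]) d).getD v [] =
      d.getD v [] ++ l.filter (fun p => km p == v) := by
  intro l
  induction l with
  | nil => intro d v; simp
  | cons p t ih =>
    intro d v
    rw [List.foldl_cons, ih]
    by_cases h : km p = v
    · subst h
      rw [List.filter_cons_of_pos (by simp)]
      have hstep : (if d.contains (km p) then d.insert (km p) (d.getD (km p) [] ++ [p])
          else d.insert (km p) [p]).getD (km p) [] = d.getD (km p) [] ++ [p] := by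
        by_cases hc : d.contains (km p)
        · rw [if_pos hc, PySem.Dict.getD_insert_self]
        · rw [if_neg hc, PySem.Dict.getD_insert_self,
            PySem.Dict.getD_of_not_contains d [] (by simpa using hc)]
          simp
      rw [hstep, List.append_assoc]
      simp
    · rw [List.filter_cons_of_neg (by simp [h])]
      have hstep : (if d.contains (km p) then d.insert (km p) (d.getD (km p) [] ++ [p])
          else d.insert (km p) [p]).getD v [] = d.getD v [] := by
        by_cases hc : d.contains (km p)
        · rw [if_pos hc]; exact PySem.Dict.getD_insert_of_ne _ _ _ (fun hh => h hh.symm)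
        · rw [if_neg hc]; exact PySem.Dict.getD_insert_of_ne _ _ _ (fun hh => h hh.symm)
      rw [hstep]

-- ---- port A as a fold over the pair stream ----
theorem pvA_eq (w : String) (k : Int) :
    CreateKMERPairs w k =
      ((pvPairs w k).foldl (fun d x => pvUpd d (pvKey w k x) (pvVal x))
        PySem.Dict.empty).items := by
  unfold CreateKMERPairs pvPairs pvKey pvVal pvUpd pvKm pvN
  rw [List.foldl_flatMap]
  simp only [List.foldl_map]

-- ---- port B as a fold over the filtered pair stream ----
theorem pvB_shape (w : String) (k : Int) :
    CreateKMERPairs_alt w k =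
      ((PySem.List.pyRange 0 (pvN w k) 1).foldl (fun out p =>
        if PySem.List.pyGetD (pvOcc w k (pvKm w k p)) 0 0 ≠ p then out
        else (PySem.List.pyRange (p + 1) (pvN w k) 1).foldl (fun out q =>
          if firstAfter (pvOcc w k (pvKm w k q)) p == q then
            pvUpd out (pvKey w k ⟨p, q⟩) (pvGap w k ⟨p, q⟩)
          else out) out) PySem.Dict.empty).items := by
  unfold CreateKMERPairs_alt pvGap pvKey pvUpd
  have hpos : ∀ v, ((PySem.List.pyRange 0 ((PySem.Str.len w : Int) - k) 1).foldl (fun pos p =>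
      let vv := PySem.Str.slice w (some p) (some (p + k))
      if pos.contains vv then pos.insert vv (pos.getD vv [] ++ [p])
      else pos.insert vv [p]) PySem.Dict.empty).getD v [] = pvOcc w k v := by
    intro v
    rw [pvPos_getD (fun i => PySem.Str.slice w (some i) (some (i + k)))]
    simp [pvOcc, pvKm, pvN]
  simp only [hpos, pvKm, pvN]

theorem pvFoldl_skip {α β : Type} (l : List β) (f : α → β → α) (P : β → Bool) (init : α)
    (h : ∀ x ∈ l, P x = false) :
    l.foldl (fun a x => if P x then f a x else a) init = init := by
  induction l with
  | nil => rfl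
  | cons x t ih =>
    rw [List.foldl_cons, if_neg (by simp [h x (by simp)])]
    exact ih (fun y hy => h y (List.mem_cons_of_mem _ hy))

theorem pvB_eq (w : String) (k : Int) :
    CreateKMERPairs_alt w k =
      (((pvPairs w k).filter (pvCond w k)).foldl
        (fun d x => pvUpd d (pvKey w k x) (pvGap w k x)) PySem.Dict.empty).items := by
  rw [pvB_shape]
  congr 1
  unfold pvPairs
  rw [List.filter_flatMap]
  rw [List.foldl_flatMap]
  apply PySem.List.foldl_congr_mem
  intro out p hp
  rw [List.filter_map, List.foldl_map]
  by_cases hc1 : PySem.List.pyGetD (pvOcc w k (pvKm w k p)) 0 0 = p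
  · rw [if_neg (by simpa using hc1), List.foldl_filter]
    apply PySem.List.foldl_congr_mem
    intro acc q hq
    simp only [Function.comp_apply, pvCond, hc1]
    simp
  · rw [if_pos (by simpa using hc1), List.foldl_filter]
    symm
    apply pvFoldl_skip
    intro q hq
    simp only [Function.comp_apply, pvCond]
    simp [hc1]

-- ---- the first pair of every key survives B's first-occurrence filter ----
theorem pvCond_first (w : String) (k : Int) :
    ∀ l₁ x l₂, pvPairs w k = l₁ ++ x :: l₂ → pvCond w k x = false →
      pvKey w k x ∈ ([] : List String) ∨ ∃ y ∈ l₁, pvKey w k y = pvKey w k x := by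
  intro l₁ x l₂ hsplit hcond
  refine Or.inr ?_
  have hx : x ∈ pvPairs w k := by rw [hsplit]; exact List.mem_append.mpr (Or.inr (by simp))
  obtain ⟨hx0, hx12, hx2n⟩ := (pvMem_pairs w k x).mp hx
  have hpocc : x.1 ∈ pvOcc w k (pvKm w k x.1) :=
    (pvMem_occ w k _ _).mpr ⟨hx0, by omega, rfl⟩
  have hqocc : x.2 ∈ pvOcc w k (pvKm w k x.2) :=
    (pvMem_occ w k _ _).mpr ⟨by omega, hx2n, rfl⟩
  rw [pvCond, Bool.and_eq_false_iff] at hcond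
  rcases hcond with h | h
  · -- x.1 is not the first occurrence of its k-mer
    have hne : pvOcc w k (pvKm w k x.1) ≠ [] := List.ne_nil_of_mem hpocc
    rw [beq_eq_false_iff_ne, pvPyGetD_zero _ hne] at h
    set p' := (pvOcc w k (pvKm w k x.1)).headD 0 with hp'
    have hp'mem : p' ∈ pvOcc w k (pvKm w k x.1) := pvHeadD_mem _ _ hne
    have hp'le : p' ≤ x.1 := pvSorted_headD_le _ _ _ (pvPairwise_occ w k _) hpocc
    have hp'lt : p' < x.1 := lt_of_le_of_ne hp'le h
    obtain ⟨h0, hn, hkm⟩ := (pvMem_occ w k _ _).mp hp'mem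
    have hymem : (p', x.2) ∈ pvPairs w k := (pvMem_pairs w k _).mpr ⟨h0, by omega, hx2n⟩
    refine ⟨(p', x.2), pvMem_prefix (pvPairwise_pairs w k) hsplit hymem (Or.inl (by simpa using hp'lt)), ?_⟩
    simp only [pvKey]
    rw [hkm]
  · -- x.2 is not the first occurrence of its k-mer after x.1
    have hspec := pvFirstAfter_spec (pvOcc w k (pvKm w k x.2)) x.1 x.2
      (pvPairwise_occ w k _) hqocc hx12
    rw [beq_eq_false_iff_ne] at h
    set fa := firstAfter (pvOcc w k (pvKm w k x.2)) x.1 with hfa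
    obtain ⟨hfamem, hfagt, hfalb⟩ := hspec
    have hfale : fa ≤ x.2 := hfalb _ hqocc hx12
    have hfalt : fa < x.2 := lt_of_le_of_ne hfale h
    obtain ⟨h0, hn, hkm⟩ := (pvMem_occ w k _ _).mp hfamem
    have hymem : (x.1, fa) ∈ pvPairs w k := (pvMem_pairs w k _).mpr ⟨hx0, hfagt, hn⟩
    refine ⟨(x.1, fa), pvMem_prefix (pvPairwise_pairs w k) hsplit hymem (Or.inr ⟨rfl, by simpa using hfalt⟩), ?_⟩
    simp only [pvKey]
    rw [hkm]

theorem pvKeys_eq (w : String) (k : Int) :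
    PySem.Set.ofList ((pvPairs w k).map (pvKey w k)) =
      PySem.Set.ofList (((pvPairs w k).filter (pvCond w k)).map (pvKey w k)) := by
  rw [PySem.Set.ofList_eq_foldl, PySem.Set.ofList_eq_foldl]
  exact pvUpdate_filter (pvKey w k) (pvCond w k) (pvPairs w k) [] (pvCond_first w k)

-- ---- per-key minima agree between the two streams ----
theorem pvGet_eq (w : String) (k : Int) (c : String) :
    (((pvPairs w k).filter (fun x => pvKey w k x == c)).map pvVal).min? =
      ((((pvPairs w k).filter (pvCond w k)).filter (fun x => pvKey w k x == c)).map
        (pvGap w k)).min? := by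
  apply pvMin?_dom
  · -- every gap of A is dominated by the group minimum B stores for its key
    intro x hx
    obtain ⟨z, hz, rfl⟩ := List.mem_map.mp hx
    obtain ⟨hzp, hzk⟩ := List.mem_filter.mp hz
    have hzkey : pvKey w k z = c := by simpa using hzk
    obtain ⟨h0, h12, h2n⟩ := (pvMem_pairs w k z).mp hzp
    have hz1m : z.1 ∈ pvOcc w k (pvKm w k z.1) := (pvMem_occ w k _ _).mpr ⟨h0, by omega, rfl⟩
    have hz2m : z.2 ∈ pvOcc w k (pvKm w k z.2) := (pvMem_occ w k _ _).mpr ⟨by omega, h2n, rfl⟩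
    have hAne : pvOcc w k (pvKm w k z.1) ≠ [] := List.ne_nil_of_mem hz1m
    set p0 := (pvOcc w k (pvKm w k z.1)).headD 0 with hp0
    have hp0m : p0 ∈ pvOcc w k (pvKm w k z.1) := pvHeadD_mem _ _ hAne
    have hp0le : p0 ≤ z.1 := pvSorted_headD_le _ _ _ (pvPairwise_occ w k _) hz1m
    obtain ⟨hp00, hp0n, hp0km⟩ := (pvMem_occ w k _ _).mp hp0m
    have hspec := pvFirstAfter_spec (pvOcc w k (pvKm w k z.2)) p0 z.2
      (pvPairwise_occ w k _) hz2m (by omega)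
    set q0 := firstAfter (pvOcc w k (pvKm w k z.2)) p0 with hq0
    obtain ⟨hq0m, hq0gt, hq0lb⟩ := hspec
    obtain ⟨hq00, hq0n, hq0km⟩ := (pvMem_occ w k _ _).mp hq0m
    have hemem : (p0, q0) ∈ pvPairs w k := (pvMem_pairs w k _).mpr ⟨hp00, hq0gt, hq0n⟩
    have hoccA : pvOcc w k (pvKm w k p0) = pvOcc w k (pvKm w k z.1) := by rw [hp0km]
    have hoccB : pvOcc w k (pvKm w k q0) = pvOcc w k (pvKm w k z.2) := by rw [hq0km]
    have hcond : pvCond w k (p0, q0) = true := by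
      rw [pvCond, Bool.and_eq_true]
      constructor
      · show (PySem.List.pyGetD (pvOcc w k (pvKm w k p0)) 0 0 == p0) = true
        rw [hoccA, pvPyGetD_zero _ hAne, ← hp0]
        simp
      · show (firstAfter (pvOcc w k (pvKm w k q0)) p0 == q0) = true
        rw [hoccB, ← hq0]
        simp
    have hkeye : pvKey w k (p0, q0) = c := by
      rw [← hzkey]
      simp only [pvKey]
      rw [hp0km, hq0km]
    have hmin := pvMinGap_min? (pvOcc w k (pvKm w k z.1)) (pvOcc w k (pvKm w k z.2))
      (pvPairwise_occ w k _) (pvPairwise_occ w k _) p0 q0 hp0m hq0m hq0gt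
    obtain ⟨hmmem, hmlb⟩ := List.min?_eq_some_iff_subtype.mp hmin
    refine ⟨pvGap w k (p0, q0), ?_, ?_⟩
    · refine List.mem_map.mpr ⟨(p0, q0), ?_, rfl⟩
      refine List.mem_filter.mpr ⟨List.mem_filter.mpr ⟨hemem, hcond⟩, by simp [hkeye]⟩
    · have hxmem : pvVal z ∈ pvCross (pvOcc w k (pvKm w k z.1)) (pvOcc w k (pvKm w k z.2)) := by
        unfold pvCross
        refine List.mem_flatMap.mpr ⟨z.1, hz1m, ?_⟩
        exact List.mem_map.mpr ⟨z.2, List.mem_filter.mpr ⟨hz2m, by simpa using h12⟩, rfl⟩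
      have : pvGap w k (p0, q0) = minGap (pvOcc w k (pvKm w k z.1)) (pvOcc w k (pvKm w k z.2)) := by
        rw [pvGap]
        rw [show (p0, q0).1 = p0 from rfl, show (p0, q0).2 = q0 from rfl, hoccA, hoccB]
      rw [this]
      exact hmlb _ hxmem
  · -- every group minimum B stores is realised by a pair of A with the same key
    intro y hy
    obtain ⟨e, he, rfl⟩ := List.mem_map.mp hy
    obtain ⟨he', hek⟩ := List.mem_filter.mp he
    obtain ⟨hep, -⟩ := List.mem_filter.mp he'
    have hekey : pvKey w k e = c := by simpa using hek
    obtain ⟨h0, h12, h2n⟩ := (pvMem_pairs w k e).mp hep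
    have he1m : e.1 ∈ pvOcc w k (pvKm w k e.1) := (pvMem_occ w k _ _).mpr ⟨h0, by omega, rfl⟩
    have he2m : e.2 ∈ pvOcc w k (pvKm w k e.2) := (pvMem_occ w k _ _).mpr ⟨by omega, h2n, rfl⟩
    have hmin := pvMinGap_min? (pvOcc w k (pvKm w k e.1)) (pvOcc w k (pvKm w k e.2))
      (pvPairwise_occ w k _) (pvPairwise_occ w k _) e.1 e.2 he1m he2m h12
    obtain ⟨hmmem, -⟩ := List.min?_eq_some_iff_subtype.mp hmin
    unfold pvCross at hmmem
    obtain ⟨p', hp'm, hrest⟩ := List.mem_flatMap.mp hmmem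
    obtain ⟨q', hq'f, hval⟩ := List.mem_map.mp hrest
    obtain ⟨hq'm, hq'gt⟩ := List.mem_filter.mp hq'f
    have hq'gt' : p' < q' := by simpa using hq'gt
    obtain ⟨hp'0, hp'n, hp'km⟩ := (pvMem_occ w k _ _).mp hp'm
    obtain ⟨hq'0, hq'n, hq'km⟩ := (pvMem_occ w k _ _).mp hq'm
    have hxmem : (p', q') ∈ pvPairs w k := (pvMem_pairs w k _).mpr ⟨hp'0, hq'gt', hq'n⟩
    refine ⟨pvVal (p', q'), ?_, ?_⟩
    · refine List.mem_map.mpr ⟨(p', q'), ?_, rfl⟩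
      refine List.mem_filter.mpr ⟨hxmem, ?_⟩
      have : pvKey w k (p', q') = c := by
        rw [← hekey]
        simp only [pvKey]
        rw [hp'km, hq'km]
      simp [this]
    · have : pvVal (p', q') = minGap (pvOcc w k (pvKm w k e.1)) (pvOcc w k (pvKm w k e.2)) := hval
      rw [this]
      rfl

-- ===== VERDICT (by name: the statement is the Claim_ definition above) =====
theorem CreateKMERPairs_spec : Claim_equal_CreateKMERPairs := by
  intro w k _
  unfold Spec_CreateKMERPairs
  rw [pvA_eq, pvB_eq]
  have hA := pvNodup_foldl (pvKey w k) pvVal (pvPairs w k)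
  have hB := pvNodup_foldl (pvKey w k) (pvGap w k) ((pvPairs w k).filter (pvCond w k))
  rw [PySem.Dict.items_eq_map_keys _ hA 0, PySem.Dict.items_eq_map_keys _ hB 0]
  rw [pvKeys_foldl, pvKeys_foldl, pvKeys_eq w k]
  apply List.map_congr_left
  intro c hc
  have hval : ((pvPairs w k).foldl (fun d x => pvUpd d (pvKey w k x) (pvVal x))
      PySem.Dict.empty).getD c 0 =
      (((pvPairs w k).filter (pvCond w k)).foldl
        (fun d x => pvUpd d (pvKey w k x) (pvGap w k x)) PySem.Dict.empty).getD c 0 := by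
    rw [PySem.Dict.getD_eq_get?_getD, PySem.Dict.getD_eq_get?_getD,
      pvGet?_foldl, pvGet?_foldl, PySem.Dict.get?_empty]
    exact congrArg (fun o => (oMin none o).getD 0) (pvGet_eq w k c)
  rw [hval]
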